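-- pv_equiv track=rewrite | github.com/Asutherland8219/TMU_assignments | Source/labs109.py | eliminate_neighbours
-- ===== SOURCE A (Python) =====
-- def eliminate_neighbours(items):
--     if len(items) == 1:
--         return 1
--     og_len = len(items)
--     index = 0
--     for i in range(1, len(items) + 1):
--         if i in items:
--             index += 1
--             if len(items) == 1:
--                 items.pop(0)
--                 break
--             center = items.index(i)
--             left = center - 1
--             if left < 0 or ((center + 1) < len(items) and items[center + 1] > items[left]):
--                 left = center + 1
--             value = items[left]
--             if center > left:
--                 center = left
--             items.pop(center)
--             items.pop(center)
--             if value == og_len: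
--                 break
--     return index
-- ===== SOURCE B (Python) =====
-- def eliminate_neighbours(items):
--     # Round-driven rewrite: instead of sweeping i = 1..n and testing membership,
--     # each round finds the smallest still-present candidate value (> last
--     # processed, <= n) together with its first position in ONE pass, then
--     # removes the pair by slicing.  Does not mutate the caller's list.
--     n = len(items)
--     if n == 1:
--         return 1
--     xs = list(items)
--     last = 0
--     rounds = 0
--     while True:
--         best = None  # (value, position) of smallest candidate, first position
--         for k, v in enumerate(xs):
--             if last < v <= n and (best is None or v < best[0]):
--                 best = (v, k)
--         if best is None:
--             return rounds
--         rounds += 1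
--         v, k = best
--         if len(xs) == 1:
--             return rounds
--         if k == 0 or (k + 1 < len(xs) and xs[k + 1] > xs[k - 1]):
--             j = k + 1
--         else:
--             j = k - 1
--         nb = xs[j]
--         lo = min(k, j)
--         xs = xs[:lo] + xs[lo + 2:]
--         if nb == n:
--             return rounds
--         last = v
-- ===== Notes on version B (the rewrite author's own statement) =====
-- stated objective: alternative
-- what changed: Replaces the i=1..n sweep (a membership scan, an index call and two pops per value, including values not present) by a round-driven loop that finds the smallest remaining candidate and its first position in one fused pass per elimination round and removes the pair by slicing, without mutating the input.
import Mathlib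
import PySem

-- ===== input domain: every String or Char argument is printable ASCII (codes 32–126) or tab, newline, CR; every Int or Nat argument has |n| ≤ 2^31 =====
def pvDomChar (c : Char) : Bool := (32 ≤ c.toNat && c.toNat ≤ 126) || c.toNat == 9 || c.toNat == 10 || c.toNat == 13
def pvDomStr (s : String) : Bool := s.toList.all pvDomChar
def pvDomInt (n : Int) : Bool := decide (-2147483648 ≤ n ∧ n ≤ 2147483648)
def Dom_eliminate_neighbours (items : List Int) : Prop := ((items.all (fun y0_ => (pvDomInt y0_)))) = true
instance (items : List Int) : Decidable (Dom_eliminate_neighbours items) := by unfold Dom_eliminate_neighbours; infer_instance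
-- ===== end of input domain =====

-- B re-implements the sweep i = 1..n with membership tests as a round-driven loop: each round
-- finds the smallest remaining candidate value and its first position in one pass, then removes
-- the pair by slicing (A mutates its argument in place; B does not — the claim is about the
-- return value only).  Objective: alternative decomposition, same asymptotic cost.

-- ===== PORT A =====
-- one iteration of A's 'for i in range(1, len(items)+1)' body; state = (items, index, broke)
def ENa.step (og : Int) (s : List Int × Int × Bool) (i : Int) : List Int × Int × Bool :=
  match s with
  | (its, index, done) =>
    if done then (its, index, done) else
    if its.contains i then
      let index := index + 1
      if its.length = 1 then
        match PySem.List.pop? its 0 with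
        | some r => (r.2, index, true)
        | none => (its, index, true)     -- unreachable: length = 1
      else
        match PySem.List.index? its i with
        | none => (its, index, done)     -- unreachable: contains holds
        | some c =>
          let center : Int := (c : Int)
          let left : Int := center - 1
          let left : Int :=
            if left < 0 ∨ (center + 1 < (its.length : Int) ∧
                (PySem.List.pyGet? its (center + 1)).getD 0 > (PySem.List.pyGet? its left).getD 0)
            then center + 1 else left
          let value : Int := (PySem.List.pyGet? its left).getD 0
          let center : Int := if center > left then left else center
          match PySem.List.pop? its center with
          | none => (its, index, done)   -- unreachable
          | some r1 =>
            match PySem.List.pop? r1.2 center with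
            | none => (r1.2, index, done)  -- unreachable
            | some r2 => (r2.2, index, if value = og then true else done)
    else (its, index, done)

def eliminate_neighbours (items : List Int) : Int :=
  if items.length = 1 then 1
  else
    let og : Int := (items.length : Int)
    ((PySem.List.pyRange 1 (og + 1) 1).foldl (ENa.step og) (items, 0, false)).2.1

-- ===== PORT B =====
-- Source B's inner 'for k, v in enumerate(xs)' pass: smallest candidate value, first position
def ENb.findBest (n last : Int) (xs : List Int) : Option (Int × Int) :=
  (PySem.List.enumerate xs 0).foldl
    (fun best kv =>
      if last < kv.2 ∧ kv.2 ≤ n ∧ (match best with | none => true | some b => decide (kv.2 < b.1)) = true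
      then some (kv.2, kv.1) else best)
    none

-- Source B's 'while True' loop; fuel only makes the recursion structural (never exhausted:
-- 'last' strictly increases and stays ≤ n, so there are at most n rounds)
def ENb.loop (n : Int) (fuel : Nat) (xs : List Int) (last rounds : Int) : Int :=
  match fuel with
  | 0 => rounds
  | fuel + 1 =>
    match ENb.findBest n last xs with
    | none => rounds
    | some (v, k) =>
      let rounds := rounds + 1
      if xs.length = 1 then rounds
      else
        let j : Int :=
          if k = 0 ∨ (k + 1 < (xs.length : Int) ∧
              (PySem.List.pyGet? xs (k + 1)).getD 0 > (PySem.List.pyGet? xs (k - 1)).getD 0)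
          then k + 1 else k - 1
        let nb : Int := (PySem.List.pyGet? xs j).getD 0
        let lo : Int := min k j
        let xs' := PySem.List.slice xs none (some lo) ++ PySem.List.slice xs (some (lo + 2)) none
        if nb = n then rounds else ENb.loop n fuel xs' v rounds

def eliminate_neighbours_alt (items : List Int) : Int :=
  if items.length = 1 then 1
  else ENb.loop (items.length : Int) items.length items 0 0

-- ===== PRECONDITION & SPEC =====
def Spec_eliminate_neighbours (items : List Int) (out : Int) : Prop := out = eliminate_neighbours_alt items
instance (items : List Int) (out : Int) : Decidable (Spec_eliminate_neighbours items out) := by unfold Spec_eliminate_neighbours; infer_instance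

-- ===== CLAIM (what is proved, stated in full; the proofs are below) =====
def Claim_equal_eliminate_neighbours : Prop := ∀ (items : List Int), Dom_eliminate_neighbours items → Spec_eliminate_neighbours items (eliminate_neighbours items)

-- ===== LEMMAS AND PROOFS =====

-- A's fold ignores the rest of the range once the loop has broken
theorem ENa.foldl_done (og : Int) (l : List Int) (its : List Int) (idx : Int) :
    l.foldl (ENa.step og) (its, idx, true) = (its, idx, true) := by
  induction l with
  | nil => rfl
  | cons x t ih => simpa [ENa.step] using ih

-- iterations whose value is absent from the current list leave the state unchanged
theorem ENa.foldl_noop (og : Int) (a b : Int) (its : List Int) (idx : Int)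
    (h : ∀ i, a ≤ i → i < b → its.contains i = false) :
    (PySem.List.pyRange a b 1).foldl (ENa.step og) (its, idx, false) = (its, idx, false) := by
  have H : ∀ (c : Nat) (a : Int), (b - a).toNat = c →
      (∀ i, a ≤ i → i < b → its.contains i = false) →
      (PySem.List.pyRange a b 1).foldl (ENa.step og) (its, idx, false) = (its, idx, false) := by
    intro c
    induction c with
    | zero =>
      intro a hc _
      rw [PySem.List.pyRange_one_eq_nil (by omega)]
      rfl
    | succ c ih =>
      intro a hc hno
      rw [PySem.List.pyRange_one_cons (by omega)]
      simp only [List.foldl_cons]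
      have hstep : ENa.step og (its, idx, false) a = (its, idx, false) := by
        have hmem : a ∉ its := by simpa using hno a le_rfl (by omega)
        simp [ENa.step, hmem]
      rw [hstep]
      exact ih (a + 1) (by omega) (fun i h1 h2 => hno i (by omega) h2)
  exact H (b - a).toNat a rfl h

-- left-to-right spec of Source B's scan: leftmost minimal candidate
def ENb.bs (n last : Int) : List Int → Nat → Option (Int × Int)
  | [], _ => none
  | x :: t, s =>
    let r := ENb.bs n last t (s + 1)
    if last < x ∧ x ≤ n then
      match r with
      | some (v, k) => if v < x then some (v, k) else some (x, (s : Int))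
      | none => some (x, (s : Int))
    else r

def ENb.merge (best r : Option (Int × Int)) : Option (Int × Int) :=
  match best, r with
  | none, r => r
  | some b, none => some b
  | some b, some (v, k) => if v < b.1 then some (v, k) else some b

theorem ENb.foldl_eq_merge (n last : Int) (t : List Int) : ∀ (s : Nat) (best : Option (Int × Int)),
    (PySem.List.enumerate t (s : Int)).foldl
      (fun best kv =>
        if last < kv.2 ∧ kv.2 ≤ n ∧ (match best with | none => true | some b => decide (kv.2 < b.1)) = true
        then some (kv.2, kv.1) else best) best
    = ENb.merge best (ENb.bs n last t s) := by
  induction t with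
  | nil => intro s best; cases best <;> rfl
  | cons x t ih =>
    intro s best
    rw [PySem.List.enumerate_cons]
    simp only [List.foldl_cons]
    have hcast : (s : Int) + 1 = ((s + 1 : Nat) : Int) := by push_cast; ring
    rw [hcast, ih (s + 1)]
    simp only [ENb.bs]
    rcases best with _ | ⟨bv, bk⟩ <;> rcases hbs : ENb.bs n last t (s + 1) with _ | ⟨v, k⟩ <;>
      by_cases h1 : last < x <;> by_cases h2 : x ≤ n <;>
      simp [ENb.merge, h1, h2]
    all_goals try split_ifs
    all_goals try rfl
    all_goals try simp_all
    all_goals try split_ifs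
    all_goals try rfl
    all_goals try (intro h)
    all_goals omega


theorem ENb.bs_none_iff (n last : Int) (xs : List Int) : ∀ (s : Nat),
    ENb.bs n last xs s = none ↔ ∀ v ∈ xs, ¬(last < v ∧ v ≤ n) := by
  induction xs with
  | nil => intro s; simp [ENb.bs]
  | cons x t ih =>
    intro s
    by_cases hP : last < x ∧ x ≤ n
    · have hR : ¬ ∀ v ∈ x :: t, ¬(last < v ∧ v ≤ n) := fun h => h x (by simp) hP
      rcases hbs : ENb.bs n last t (s + 1) with _ | ⟨v, k⟩
      · exact iff_of_false (by simp [ENb.bs, hbs, hP]) hR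
      · exact iff_of_false (by simp [ENb.bs, hbs, hP]; try (split_ifs <;> simp)) hR
    · simp only [ENb.bs, hP, if_false]
      rw [ih (s + 1)]
      constructor
      · intro h v hv
        rcases List.mem_cons.mp hv with rfl | hv'
        · exact hP
        · exact h v hv'
      · intro h v hv
        exact h v (List.mem_cons_of_mem _ hv)

theorem ENb.bs_some (n last : Int) (xs : List Int) : ∀ (s : Nat) (v k : Int),
    ENb.bs n last xs s = some (v, k) →
    (last < v ∧ v ≤ n) ∧ (∀ w ∈ xs, last < w ∧ w ≤ n → v ≤ w) ∧
    ∃ j : Nat, k = (s : Int) + (j : Int) ∧ PySem.List.index? xs v = some j := by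
  induction xs with
  | nil => intro s v k h; simp [ENb.bs] at h
  | cons x t ih =>
    intro s v k h
    by_cases hP : last < x ∧ x ≤ n
    · rcases hbs : ENb.bs n last t (s + 1) with _ | ⟨v', k'⟩
      · obtain ⟨rfl, rfl⟩ : x = v ∧ (s : Int) = k := by
          simpa [ENb.bs, hbs, hP] using h
        refine ⟨hP, ?_, 0, by simp, by rw [PySem.List.index?_cons_self]⟩
        rintro w hw hPw
        rcases List.mem_cons.mp hw with rfl | hw2
        · exact le_refl _
        · exact absurd hPw ((ENb.bs_none_iff n last t (s + 1)).mp hbs w hw2)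
      · obtain ⟨hp', hmin', j', hk', hidx'⟩ := ih (s + 1) v' k' hbs
        replace h : (if v' < x then some (v', k') else some (x, (s : Int))) = some (v, k) := by
          simpa [ENb.bs, hbs, hP] using h
        by_cases hvx : v' < x
        · rw [if_pos hvx] at h
          obtain ⟨rfl, rfl⟩ : v' = v ∧ k' = k := by simpa using h
          refine ⟨hp', ?_, j' + 1, by push_cast [hk']; omega, ?_⟩
          · rintro w hw hPw
            rcases List.mem_cons.mp hw with rfl | hw2
            · omega
            · exact hmin' w hw2 hPw
          · have hne : x ≠ v' := by omega
            rw [PySem.List.index?_cons_of_ne _ hne, hidx']; rfl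
        · rw [if_neg hvx] at h
          obtain ⟨rfl, rfl⟩ : x = v ∧ (s : Int) = k := by simpa using h
          refine ⟨hP, ?_, 0, by simp, by rw [PySem.List.index?_cons_self]⟩
          rintro w hw hPw
          rcases List.mem_cons.mp hw with rfl | hw2
          · exact le_refl _
          · exact le_trans (by omega) (hmin' w hw2 hPw)
    · simp only [ENb.bs, hP, if_false] at h
      obtain ⟨hp, hmin, j, hk, hidx⟩ := ih (s + 1) v k h
      have hne : x ≠ v := fun he => hP (he ▸ hp)
      refine ⟨hp, ?_, j + 1, by push_cast [hk]; omega, ?_⟩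
      · rintro w hw hPw
        rcases List.mem_cons.mp hw with rfl | hw2
        · exact absurd hPw hP
        · exact hmin w hw2 hPw
      · rw [PySem.List.index?_cons_of_ne _ hne, hidx]; rfl

theorem ENb.findBest_eq_bs (n last : Int) (xs : List Int) :
    ENb.findBest n last xs = ENb.bs n last xs 0 := by
  have h := ENb.foldl_eq_merge n last xs 0 none
  simpa [ENb.findBest, ENb.merge] using h

-- removing positions c and c+1 (Python: two pops at c) is a splice
theorem pops_eq_splice (xs : List Int) (c : Nat) (h : c + 1 < xs.length) :
    ∃ a b, PySem.List.pop? xs (c : Int) = some (a, xs.eraseIdx c) ∧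
      PySem.List.pop? (xs.eraseIdx c) (c : Int) = some (b, xs.take c ++ xs.drop (c + 2)) := by
  have h1 : c < xs.length := by omega
  have h2 : c < (xs.eraseIdx c).length := by
    rw [List.length_eraseIdx_of_lt h1]; omega
  refine ⟨xs[c], (xs.eraseIdx c)[c], ?_, ?_⟩
  · exact PySem.List.pop?_natCast xs c h1
  · rw [PySem.List.pop?_natCast (xs.eraseIdx c) c h2]
    have he : (xs.eraseIdx c).eraseIdx c = xs.take c ++ xs.drop (c + 2) := by
      rw [List.eraseIdx_eq_take_drop_succ xs c,
          List.eraseIdx_append_of_length_le (by simp [List.length_take]),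
          List.eraseIdx_eq_take_drop_succ]
      have hl : (xs.take c).length = c := by simp [List.length_take]; omega
      rw [hl]
      simp [List.drop_drop]
    rw [he]

-- the main simulation: A's remaining sweep over [i₀, n+1) computes B's loop from last = i₀ - 1
theorem main_sim (n : Int) : ∀ (c fuel : Nat), c ≤ fuel → ∀ (i₀ : Int) (xs : List Int) (idx : Int),
    i₀ + (c : Int) = n + 1 →
    ((PySem.List.pyRange i₀ (n + 1) 1).foldl (ENa.step n) (xs, idx, false)).2.1
      = ENb.loop n fuel xs (i₀ - 1) idx := by
  intro c
  induction c using Nat.strong_induction_on with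
  | _ c ih =>
  intro fuel hcf i₀ xs idx hi
  rcases hfb : ENb.findBest n (i₀ - 1) xs with _ | ⟨v, k⟩
  · -- no remaining candidate: A's sweep is a no-op, B stops
    have hbs : ENb.bs n (i₀ - 1) xs 0 = none := by rw [← ENb.findBest_eq_bs]; exact hfb
    have hnone := (ENb.bs_none_iff n (i₀ - 1) xs 0).mp hbs
    have hno : ∀ i, i₀ ≤ i → i < n + 1 → xs.contains i = false := by
      intro i h1 h2
      by_contra hc
      have hmem : i ∈ xs := by
        have := Bool.not_eq_false (xs.contains i) |>.mp ?_ ; exact List.contains_iff_mem.mp this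
        exact hc
      exact hnone i hmem ⟨by omega, by omega⟩
    rw [ENa.foldl_noop n i₀ (n + 1) xs idx hno]
    cases fuel with
    | zero => rfl
    | succ f => simp [ENb.loop, hfb]
  · -- candidate v, first position k
    have hbs : ENb.bs n (i₀ - 1) xs 0 = some (v, k) := by rw [← ENb.findBest_eq_bs]; exact hfb
    obtain ⟨⟨hv1, hv2⟩, hmin, j, hkj, hidx⟩ := ENb.bs_some n (i₀ - 1) xs 0 v k hbs
    obtain rfl : k = (j : Int) := by omega
    obtain ⟨hjlen, hxj, -⟩ := PySem.List.getElem_of_index?_eq_some hidx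
    have hvmem : v ∈ xs := by rw [← hxj]; exact List.getElem_mem hjlen
    have hc1 : 1 ≤ c := by omega
    obtain ⟨f, rfl⟩ : ∃ f, fuel = f + 1 := ⟨fuel - 1, by omega⟩
    rw [PySem.List.pyRange_one_append i₀ v (n + 1) (by omega) (by omega), List.foldl_append,
        ENa.foldl_noop n i₀ v xs idx ?noop]
    case noop =>
      intro i h1 h2
      by_contra hc
      have hmem : i ∈ xs := List.contains_iff_mem.mp (Bool.not_eq_false (xs.contains i) |>.mp hc)
      have := hmin i hmem ⟨by omega, by omega⟩
      omega
    rw [PySem.List.pyRange_one_cons (by omega : v < n + 1)]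
    simp only [List.foldl_cons]
    by_cases hlen1 : xs.length = 1
    · -- a single element left: both count it and stop
      obtain ⟨x0, rfl⟩ : ∃ x0, xs = [x0] := by
        cases xs with
        | nil => simp at hlen1
        | cons a t => cases t with
          | nil => exact ⟨a, rfl⟩
          | cons b t' => simp at hlen1
      have hvx0 : v = x0 := by simpa using hvmem
      have hstep : ENa.step n ([x0], idx, false) v = ([], idx + 1, true) := by
        simp [ENa.step, hvx0, PySem.List.pop?, PySem.List.pyIdx?]
      rw [hstep, ENa.foldl_done]
      simp [ENb.loop, hfb]
    · -- the elimination round proper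
      have hlen2 : 2 ≤ xs.length := by
        rcases xs with _ | ⟨a, t⟩
        · simp at hvmem
        · rcases t with _ | _
          · simp at hlen1
          · simp
      have hidx' : List.idxOf? v xs = some j := by
        have h := hidx
        rwa [PySem.List.index?_eq_idxOf?] at h
      by_cases hX : (j = 0 ∨ ((j : Int) + 1 < (xs.length : Int) ∧
          (PySem.List.pyGet? xs ((j : Int) - 1)).getD 0 < (PySem.List.pyGet? xs ((j : Int) + 1)).getD 0))
      · -- right neighbour is removed: splice at j
        have hjlt : j + 1 < xs.length := by
          rcases hX with h0 | hx
          · omega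
          · omega
        obtain ⟨a, b, hp1, hp2⟩ := pops_eq_splice xs j hjlt
        have hstep : ENa.step n (xs, idx, false) v =
            (xs.take j ++ xs.drop (j + 2), idx + 1,
              if (PySem.List.pyGet? xs ((j : Int) + 1)).getD 0 = n then true else false) := by
          simp only [ENa.step]
          simp [hvmem, hlen1, hidx', hX, hp1, hp2,
            (show ¬((j : Int) + 1 < (j : Int)) by omega)]
        rw [hstep]
        have hs1 : PySem.List.slice xs none (some ((j : Int))) = xs.take j := by
          rw [PySem.List.slice_to xs (by omega)]; norm_num
        have hs2 : PySem.List.slice xs (some ((j : Int) + 2)) none = xs.drop (j + 2) := by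
          rw [PySem.List.slice_from xs (by omega), (show ((j : Int) + 2).toNat = j + 2 by omega)]
        by_cases hnb : (PySem.List.pyGet? xs ((j : Int) + 1)).getD 0 = n
        · rw [if_pos hnb]
          rw [ENa.foldl_done]
          simp [ENb.loop, hfb, hlen1, hX]
          simp [hnb]
        · rw [if_neg hnb]
          have hrec := ih (n - v).toNat (by omega) f (by omega) (v + 1)
            (xs.take j ++ xs.drop (j + 2)) (idx + 1) (by omega)
          have hv1' : v + 1 - 1 = v := by omega
          rw [hv1'] at hrec
          rw [hrec]
          simp [ENb.loop, hfb, hlen1, hX, hs1, hs2]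
          simp [hnb]
      · -- left neighbour is removed: splice at j - 1
        have hj1 : 1 ≤ j := by
          by_contra hj0
          exact hX (Or.inl (by omega))
        have hjlt : (j - 1) + 1 < xs.length := by omega
        obtain ⟨a, b, hp1, hp2⟩ := pops_eq_splice xs (j - 1) hjlt
        have hj1c : (j : Int) - 1 = ((j - 1 : Nat) : Int) := by omega
        have hp1' : PySem.List.pop? xs ((j : Int) - 1) = some (a, xs.eraseIdx (j - 1)) := by
          rw [hj1c]; exact hp1
        have hp2' : PySem.List.pop? (xs.eraseIdx (j - 1)) ((j : Int) - 1)
            = some (b, xs.take (j - 1) ++ xs.drop ((j - 1) + 2)) := by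
          rw [hj1c]; exact hp2
        have hstep : ENa.step n (xs, idx, false) v =
            (xs.take (j - 1) ++ xs.drop ((j - 1) + 2), idx + 1,
              if (PySem.List.pyGet? xs ((j : Int) - 1)).getD 0 = n then true else false) := by
          simp only [ENa.step]
          simp [hvmem, hlen1, hidx', hX, hp1', hp2',
            (show ((j : Int) - 1 < (j : Int)) by omega)]
        rw [hstep]
        have hs1 : PySem.List.slice xs none (some ((j : Int) - 1)) = xs.take (j - 1) := by
          rw [PySem.List.slice_to xs (by omega)]
          congr 1
          omega
        have hs2 : PySem.List.slice xs (some (((j : Int) - 1) + 2)) none = xs.drop ((j - 1) + 2) := by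
          rw [PySem.List.slice_from xs (by omega)]
          congr 1
          omega
        by_cases hnb : (PySem.List.pyGet? xs ((j : Int) - 1)).getD 0 = n
        · rw [if_pos hnb]
          rw [ENa.foldl_done]
          simp [ENb.loop, hfb, hlen1, hX]
          simp [hnb]
        · rw [if_neg hnb]
          have hrec := ih (n - v).toNat (by omega) f (by omega) (v + 1)
            (xs.take (j - 1) ++ xs.drop ((j - 1) + 2)) (idx + 1) (by omega)
          have hv1' : v + 1 - 1 = v := by omega
          rw [hv1'] at hrec
          rw [hrec]
          simp [ENb.loop, hfb, hlen1, hX, hs1, hs2]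
          simp [hnb]

-- ===== VERDICT (by name: the statement is the Claim_ definition above) =====
theorem eliminate_neighbours_spec : Claim_equal_eliminate_neighbours := by
  intro items _
  unfold Spec_eliminate_neighbours eliminate_neighbours eliminate_neighbours_alt
  by_cases h1 : items.length = 1
  · simp [h1]
  · simp only [h1, if_false]
    exact main_sim (items.length : Int) items.length items.length le_rfl 1 items 0 (by omega)
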